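-- pv_equiv track=rewrite | github.com/so-coolboy/nlp_competion | ner_torch/preprocess/preprocess.py | correct_escape_char
-- ===== SOURCE A (Python) =====
-- def correct_escape_char(text):
--     correct_lists = [("&ldquo;", "§" * (len("&ldquo;") - 1) + '"'), ("&rdquo;", '"' + "§" * (len("&rdquo;") - 1)),
--                      ("&#40;", "§" * (len("&#40;") - 1) + '('), ("&#41;", ')' + "§" * (len("&#41;") - 1)),
--                      ("&alpha;", "§" * (len("&alpha;") - 1) + 'α'), ("&beta;", "§" * (len("&beta;") - 1) + 'β'),
--                      ("&mdash;", "§" * len("&mdash;")), ("&times;", "§" * len("&times;")),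
--                      ]
--     for correct_char in correct_lists:
--         text = text.replace(correct_char[0], correct_char[1])
--     return text
-- ===== SOURCE B (Python) =====
-- import re
--
-- _TABLE = {
--     "&ldquo;": "§" * 6 + '"',
--     "&rdquo;": '"' + "§" * 6,
--     "&#40;": "§" * 4 + '(',
--     "&#41;": ')' + "§" * 4,
--     "&alpha;": "§" * 6 + 'α',
--     "&beta;": "§" * 5 + 'β',
--     "&mdash;": "§" * 7,
--     "&times;": "§" * 7,
-- }
-- _PATTERN = re.compile("|".join(re.escape(k) for k in _TABLE))
--
--
-- def correct_escape_char(text):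
--     return _PATTERN.sub(lambda m: _TABLE[m.group(0)], text)
-- ===== Notes on version B (the rewrite author's own statement) =====
-- stated objective: idiomatic
-- what changed: Replaces the chain of 8 sequential str.replace passes by a single compiled-regex pass: one alternation of the escaped entity keys with a table lookup in the substitution callback, so the text is traversed once.
import Mathlib
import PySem

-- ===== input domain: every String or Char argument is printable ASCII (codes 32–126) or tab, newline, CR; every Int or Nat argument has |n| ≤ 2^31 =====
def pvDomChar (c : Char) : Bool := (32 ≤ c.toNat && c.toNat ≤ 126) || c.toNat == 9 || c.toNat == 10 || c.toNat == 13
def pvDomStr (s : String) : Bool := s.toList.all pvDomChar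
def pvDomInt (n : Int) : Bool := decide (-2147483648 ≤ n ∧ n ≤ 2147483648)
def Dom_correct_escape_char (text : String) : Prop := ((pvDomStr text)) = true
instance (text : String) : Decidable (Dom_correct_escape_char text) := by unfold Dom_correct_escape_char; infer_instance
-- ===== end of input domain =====

-- B replaces A's chain of 8 sequential str.replace passes by a single left-to-right pass
-- (a compiled regex alternation with a table lookup per match); same return value.

-- ===== PORT A =====
def correct_escape_char (text : String) : String :=
  let correct_lists : List (String × String) :=
    [("&ldquo;", "§§§§§§\""), ("&rdquo;", "\"§§§§§§"), ("&#40;", "§§§§("),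
     ("&#41;", ")§§§§"), ("&alpha;", "§§§§§§α"), ("&beta;", "§§§§§β"),
     ("&mdash;", "§§§§§§§"), ("&times;", "§§§§§§§")]
  correct_lists.foldl (fun t p => PySem.Str.replace t p.1 p.2) text

-- ===== PORT B =====
-- the entity → padded-marker table of Source B, as character lists
def escK1 : List Char := "&ldquo;".toList
def escR1 : List Char := "§§§§§§\"".toList
def escK2 : List Char := "&rdquo;".toList
def escR2 : List Char := "\"§§§§§§".toList
def escK3 : List Char := "&#40;".toList
def escR3 : List Char := "§§§§(".toList
def escK4 : List Char := "&#41;".toList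
def escR4 : List Char := ")§§§§".toList
def escK5 : List Char := "&alpha;".toList
def escR5 : List Char := "§§§§§§α".toList
def escK6 : List Char := "&beta;".toList
def escR6 : List Char := "§§§§§β".toList
def escK7 : List Char := "&mdash;".toList
def escR7 : List Char := "§§§§§§§".toList
def escK8 : List Char := "&times;".toList
def escR8 : List Char := "§§§§§§§".toList

-- single pass of re.sub: at each position try the alternatives in pattern order;
-- on a match emit the table entry and resume after the match, else copy the character
def escScan : List Char → List Char
  | [] => []
  | c :: t =>
    if escK1 <+: (c :: t) then escR1 ++ escScan (t.drop 6)
    else if escK2 <+: (c :: t) then escR2 ++ escScan (t.drop 6)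
    else if escK3 <+: (c :: t) then escR3 ++ escScan (t.drop 4)
    else if escK4 <+: (c :: t) then escR4 ++ escScan (t.drop 4)
    else if escK5 <+: (c :: t) then escR5 ++ escScan (t.drop 6)
    else if escK6 <+: (c :: t) then escR6 ++ escScan (t.drop 5)
    else if escK7 <+: (c :: t) then escR7 ++ escScan (t.drop 6)
    else if escK8 <+: (c :: t) then escR8 ++ escScan (t.drop 6)
    else c :: escScan t
  termination_by s => s.length
  decreasing_by all_goals (simp; try omega)

def correct_escape_char_alt (text : String) : String :=
  String.ofList (escScan text.toList)

-- ===== PRECONDITION & SPEC =====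
def Spec_correct_escape_char (text : String) (out : String) : Prop := out = correct_escape_char_alt text
instance (text : String) (out : String) : Decidable (Spec_correct_escape_char text out) := by unfold Spec_correct_escape_char; infer_instance

-- ===== CLAIM (what is proved, stated in full; the proofs are below) =====
def Claim_equal_correct_escape_char : Prop := ∀ (text : String), Dom_correct_escape_char text → Spec_correct_escape_char text (correct_escape_char text)

-- ===== LEMMAS AND PROOFS =====

-- plain structural form of Python's str.replace (old nonempty)
def replaceL (k r : List Char) : List Char → List Char
  | [] => []
  | c :: t =>
    if k <+: (c :: t) ∧ k ≠ [] then r ++ replaceL k r (t.drop (k.length - 1))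
    else c :: replaceL k r t
  termination_by s => s.length
  decreasing_by all_goals (simp; try omega)

lemma replaceL_nil (k r : List Char) : replaceL k r [] = [] := by simp [replaceL]

lemma replaceL_cons_pos (k r : List Char) (c : Char) (t : List Char)
    (h : k <+: (c :: t)) (hk : k ≠ []) :
    replaceL k r (c :: t) = r ++ replaceL k r (t.drop (k.length - 1)) := by
  rw [replaceL]; simp [h, hk]

lemma replaceL_cons_neg (k r : List Char) (c : Char) (t : List Char)
    (h : ¬ k <+: (c :: t)) :
    replaceL k r (c :: t) = c :: replaceL k r t := by
  rw [replaceL]; simp [h]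

-- bridge: PySem's fueled accumulator loop computes replaceL
lemma go_eq_replaceL (k r : List Char) (hk : k ≠ []) :
    ∀ (fuel : Nat) (l acc : List Char), l.length ≤ fuel →
      PySem.Chars.replace.go k r fuel l acc = acc.reverse ++ replaceL k r l := by
  intro fuel
  induction fuel with
  | zero =>
    intro l acc hl
    have : l = [] := by cases l <;> simp_all
    subst this
    simp [PySem.Chars.replace.go, replaceL_nil]
  | succ n ih =>
    intro l acc hl
    cases l with
    | nil => simp [PySem.Chars.replace.go, replaceL_nil]
    | cons c t =>
      by_cases h : k.isPrefixOf (c :: t)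
      · have hp : k <+: (c :: t) := List.isPrefixOf_iff_prefix.mp h
        have hlen : 1 ≤ k.length := by cases k <;> simp_all
        have hdrop : (c :: t).drop k.length = t.drop (k.length - 1) := by
          obtain ⟨m, hm⟩ : ∃ m, k.length = m + 1 := ⟨k.length - 1, by omega⟩
          simp [hm]
        have hstep : PySem.Chars.replace.go k r (n+1) (c :: t) acc
            = PySem.Chars.replace.go k r n ((c :: t).drop k.length) (r.reverse ++ acc) := by
          simp [PySem.Chars.replace.go, h]
        rw [hstep, hdrop, ih (t.drop (k.length - 1)) (r.reverse ++ acc)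
              (by simp at hl ⊢; omega)]
        rw [replaceL_cons_pos k r c t hp hk]
        simp
      · have hstep : PySem.Chars.replace.go k r (n+1) (c :: t) acc
            = PySem.Chars.replace.go k r n t (c :: acc) := by
          simp [PySem.Chars.replace.go, h]
        rw [hstep, ih t (c :: acc) (by simp at hl; omega)]
        rw [replaceL_cons_neg k r c t (fun hp => h (List.isPrefixOf_iff_prefix.mpr hp))]
        simp

lemma replace_eq_replaceL (s k r : List Char) (hk : k ≠ []) :
    PySem.Chars.replace s k r = replaceL k r s := by
  have : k.isEmpty = false := by cases k <;> simp_all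
  rw [PySem.Chars.replace]
  simp [this]
  simpa using go_eq_replaceL k r hk s.length s [] le_rfl

-- the A-side fold on the character level
def escTable : List (List Char × List Char) :=
  [(escK1, escR1), (escK2, escR2), (escK3, escR3), (escK4, escR4),
   (escK5, escR5), (escK6, escR6), (escK7, escR7), (escK8, escR8)]

def foldA (s : List Char) : List Char :=
  escTable.foldl (fun t p => replaceL p.1 p.2 t) s

lemma A_chars (s : String) : (correct_escape_char s).toList = foldA s.toList := by
  simp only [correct_escape_char, foldA, escTable, List.foldl,
    PySem.Str.toList_replace]
  rw [replace_eq_replaceL _ _ _ (by decide), replace_eq_replaceL _ _ _ (by decide),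
      replace_eq_replaceL _ _ _ (by decide), replace_eq_replaceL _ _ _ (by decide),
      replace_eq_replaceL _ _ _ (by decide), replace_eq_replaceL _ _ _ (by decide),
      replace_eq_replaceL _ _ _ (by decide), replace_eq_replaceL _ _ _ (by decide)]
  rfl

-- a nonempty prefix u of replaceL's output that avoids the replacement's head char
-- was already a prefix of the input
lemma noNew (k r : List Char) (hr : r ≠ []) (hkne : k ≠ []) :
    ∀ (t u : List Char), r.headI ∉ u → u <+: replaceL k r t → u <+: t := by
  intro t
  induction t with
  | nil => intro u _ h; simpa [replaceL_nil] using h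
  | cons c t ih =>
    intro u hu h
    by_cases hp : k <+: (c :: t) ∧ k ≠ []
    · rw [replaceL_cons_pos k r c t hp.1 hp.2] at h
      cases u with
      | nil => exact List.nil_prefix
      | cons x u' =>
        exfalso
        obtain ⟨h0, r', hr'⟩ : ∃ h0 r', r = h0 :: r' := by
          cases r with | nil => exact absurd rfl hr | cons a b => exact ⟨a, b, rfl⟩
        rw [hr'] at h
        have : x = h0 := (List.cons_prefix_cons.mp h).1
        apply hu
        simp [hr', this]
    · rw [replaceL_cons_neg k r c t (fun hpre => hp ⟨hpre, hkne⟩)] at h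
      cases u with
      | nil => exact List.nil_prefix
      | cons x u' =>
        obtain ⟨hx, hpre⟩ := List.cons_prefix_cons.mp h
        exact List.cons_prefix_cons.mpr ⟨hx, ih u' (fun hm => hu (by simp [hm])) hpre⟩

-- a key that did not match at the head still does not match after another rule ran on the tail
lemma pres_neg (k r k2 t : List Char) (c : Char) (hr : r ≠ []) (hkne : k ≠ []) (hh : r.headI ∉ k2)
    (hne : ¬ k2 <+: (c :: t)) : ¬ k2 <+: (c :: replaceL k r t) := by
  intro hp
  cases k2 with
  | nil => exact hne List.nil_prefix
  | cons a u =>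
    obtain ⟨hac, hpre⟩ := List.cons_prefix_cons.mp hp
    exact hne (List.cons_prefix_cons.mpr
      ⟨hac, noNew k r hr hkne t u (fun hm => hh (by simp [hm])) hpre⟩)

-- peeling an untouched prefix through one replaceL pass
lemma peel (k r : List Char) :
    ∀ (pre rest : List Char),
      (∀ suf ∈ pre.tails, suf ≠ [] → ¬ k <+: (suf ++ rest)) →
      replaceL k r (pre ++ rest) = pre ++ replaceL k r rest := by
  intro pre
  induction pre with
  | nil => intro rest _; simp
  | cons c p ih =>
    intro rest hp
    have hnp : ¬ k <+: (c :: (p ++ rest)) := by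
      have := hp (c :: p) (by simp [List.mem_tails]) (by simp)
      simpa using this
    rw [List.cons_append, replaceL_cons_neg k r _ _ hnp,
        ih rest (fun suf hs hne => hp suf (by
          rw [List.mem_tails] at hs ⊢
          exact hs.trans (List.suffix_cons c p)) hne)]
    simp

lemma head_eq_of_prefix {u v : List Char} (h : u <+: v) (hu : u ≠ []) :
    u.headI = v.headI := by
  cases u with
  | nil => exact absurd rfl hu
  | cons a u' =>
    obtain ⟨t, ht⟩ := h
    cases v with
    | nil => simp at ht
    | cons b v' => simp_all

-- one pass whose key k cannot match anywhere inside pre ++ rest before rest starts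
lemma peel_key (k r pre : List Char) (hk : k.headI = '&') (hkne : k ≠ [])
    (hsuf : ∀ suf ∈ pre.tails, suf ≠ [] → suf = pre ∨ suf.headI ≠ '&')
    (hcomp : ¬ k <+: pre ∧ ¬ pre <+: k) (rest : List Char) :
    replaceL k r (pre ++ rest) = pre ++ replaceL k r rest := by
  apply peel
  intro suf hs hne hpre
  rcases hsuf suf hs hne with h | h
  · subst h
    rcases List.prefix_or_prefix_of_prefix hpre (List.prefix_append suf rest) with h2 | h2
    · exact hcomp.1 h2
    · exact hcomp.2 h2
  · apply h
    have := head_eq_of_prefix hpre hkne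
    rw [hk] at this
    cases suf with
    | nil => exact absurd rfl hne
    | cons a s => simpa using this.symm

-- peeling the emitted replacement (which contains no '&') through a later pass
lemma peel_rep (k r pre : List Char) (hk : k.headI = '&') (hkne : k ≠ [])
    (hsuf : ∀ suf ∈ pre.tails, suf ≠ [] → suf.headI ≠ '&') (rest : List Char) :
    replaceL k r (pre ++ rest) = pre ++ replaceL k r rest := by
  apply peel
  intro suf hs hne hpre
  apply hsuf suf hs hne
  have := head_eq_of_prefix hpre hkne
  rw [hk] at this
  cases suf with
  | nil => exact absurd rfl hne
  | cons a s => simpa using this.symm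

-- the key itself fires
lemma peel_self (k r : List Char) (hk : k ≠ []) (rest : List Char) :
    replaceL k r (k ++ rest) = r ++ replaceL k r rest := by
  cases k with
  | nil => exact absurd rfl hk
  | cons a k' =>
    rw [List.cons_append,
        replaceL_cons_pos (a :: k') r a (k' ++ rest) (by simp) (by simp)]
    congr 1
    have : (a :: k').length - 1 = k'.length := by simp
    rw [this, List.drop_left]

-- generic: when no key of the table matches at the head, the whole fold peels the head char
lemma fold_none_gen (tbl : List (List Char × List Char))
    (hkeys : ∀ p ∈ tbl, p.1 ≠ [])
    (hrep : ∀ p ∈ tbl, ∀ q ∈ tbl, p.2 ≠ [] ∧ p.2.headI ∉ q.1) :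
    ∀ (c : Char) (t : List Char), (∀ p ∈ tbl, ¬ p.1 <+: (c :: t)) →
      tbl.foldl (fun s p => replaceL p.1 p.2 s) (c :: t)
        = c :: tbl.foldl (fun s p => replaceL p.1 p.2 s) t := by
  induction tbl with
  | nil => intro c t _; simp
  | cons p tbl ih =>
    intro c t hneg
    simp only [List.foldl_cons]
    rw [replaceL_cons_neg p.1 p.2 c t (hneg p (by simp))]
    exact ih
      (fun a ha => hkeys a (by simp [ha]))
      (fun a ha b hb => hrep a (by simp [ha]) b (by simp [hb]))
      c (replaceL p.1 p.2 t)
      (fun q hq => pres_neg p.1 p.2 q.1 t c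
        (hrep p (by simp) q (by simp [hq])).1
        (hkeys p (by simp))
        (hrep p (by simp) q (by simp [hq])).2
        (hneg q (by simp [hq])))

-- peeling an emitted replacement (no '&' anywhere) through the remaining passes
lemma fold_rep_gen (tbl : List (List Char × List Char)) (r : List Char)
    (h2 : ∀ p ∈ tbl, p.1.headI = '&' ∧ p.1 ≠ [])
    (hrsuf : ∀ suf ∈ r.tails, suf ≠ [] → suf.headI ≠ '&') :
    ∀ (x : List Char),
      tbl.foldl (fun s p => replaceL p.1 p.2 s) (r ++ x)
        = r ++ tbl.foldl (fun s p => replaceL p.1 p.2 s) x := by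
  induction tbl with
  | nil => intro x; simp
  | cons q tbl ih =>
    intro x
    simp only [List.foldl_cons]
    rw [peel_rep q.1 q.2 r (h2 q (by simp)).1 (h2 q (by simp)).2 hrsuf]
    exact ih (fun p hp => h2 p (by simp [hp])) (replaceL q.1 q.2 x)

-- generic: when the key of the middle entry matches at the head, the whole fold fires it once
lemma fold_key_gen (tbl₁ tbl₂ : List (List Char × List Char)) (k r : List Char)
    (hkne : k ≠ [])
    (hksuf : ∀ suf ∈ k.tails, suf ≠ [] → suf = k ∨ suf.headI ≠ '&')
    (h1 : ∀ p ∈ tbl₁, p.1.headI = '&' ∧ p.1 ≠ [] ∧ ¬ p.1 <+: k ∧ ¬ k <+: p.1)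
    (h2 : ∀ p ∈ tbl₂, p.1.headI = '&' ∧ p.1 ≠ [])
    (hrsuf : ∀ suf ∈ r.tails, suf ≠ [] → suf.headI ≠ '&') :
    ∀ (rest : List Char),
      (tbl₁ ++ (k, r) :: tbl₂).foldl (fun s p => replaceL p.1 p.2 s) (k ++ rest)
        = r ++ (tbl₁ ++ (k, r) :: tbl₂).foldl (fun s p => replaceL p.1 p.2 s) rest := by
  induction tbl₁ with
  | nil =>
    intro rest
    simp only [List.nil_append, List.foldl_cons]
    rw [peel_self k r hkne rest]
    exact fold_rep_gen tbl₂ r h2 hrsuf (replaceL k r rest)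
  | cons p tbl₁ ih =>
    intro rest
    simp only [List.cons_append, List.foldl_cons]
    rw [peel_key p.1 p.2 k (h1 p (by simp)).1 (h1 p (by simp)).2.1 hksuf
          ⟨(h1 p (by simp)).2.2.1, (h1 p (by simp)).2.2.2⟩ rest]
    exact ih (fun q hq => h1 q (by simp [hq])) (replaceL p.1 p.2 rest)

-- main: the eight sequential passes equal the single scan
lemma foldA_eq_scan : ∀ (n : Nat) (s : List Char), s.length ≤ n → foldA s = escScan s := by
  intro n
  induction n with
  | zero =>
    intro s hs
    have : s = [] := by cases s <;> simp_all
    subst this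
    simp [foldA, escTable, List.foldl, replaceL_nil, escScan]
  | succ n ih =>
    intro s hs
    cases s with
    | nil => simp [foldA, escTable, List.foldl, replaceL_nil, escScan]
    | cons c t =>
      rw [escScan]
      split_ifs with h1 h2 h3 h4 h5 h6 h7 h8
      · obtain ⟨rest, hres⟩ := h1
        have ht : t = escK1.tail ++ rest := by
          have h' := hres
          rw [show escK1 = '&' :: escK1.tail from by decide, List.cons_append] at h'
          injection h' with _ h''
          exact h''.symm
        have hdrop : t.drop 6 = rest := by rw [ht]; exact List.drop_left' (by decide)
        have hlen : rest.length ≤ n := by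
          have hlc := congrArg List.length hres
          have hkl : escK1.length = 7 := by decide
          simp [List.length_append] at hlc hs
          omega
        rw [hdrop, ← hres]
        have hfold := fold_key_gen [] [(escK2, escR2), (escK3, escR3), (escK4, escR4), (escK5, escR5), (escK6, escR6), (escK7, escR7), (escK8, escR8)]
          escK1 escR1 (by decide) (by decide) (by decide) (by decide) (by decide) rest
        calc foldA (escK1 ++ rest) = escR1 ++ foldA rest := by
              simpa [foldA, escTable] using hfold
          _ = escR1 ++ escScan rest := by rw [ih rest hlen]
      · obtain ⟨rest, hres⟩ := h2
        have ht : t = escK2.tail ++ rest := by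
          have h' := hres
          rw [show escK2 = '&' :: escK2.tail from by decide, List.cons_append] at h'
          injection h' with _ h''
          exact h''.symm
        have hdrop : t.drop 6 = rest := by rw [ht]; exact List.drop_left' (by decide)
        have hlen : rest.length ≤ n := by
          have hlc := congrArg List.length hres
          have hkl : escK2.length = 7 := by decide
          simp [List.length_append] at hlc hs
          omega
        rw [hdrop, ← hres]
        have hfold := fold_key_gen [(escK1, escR1)] [(escK3, escR3), (escK4, escR4), (escK5, escR5), (escK6, escR6), (escK7, escR7), (escK8, escR8)]
          escK2 escR2 (by decide) (by decide) (by decide) (by decide) (by decide) rest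
        calc foldA (escK2 ++ rest) = escR2 ++ foldA rest := by
              simpa [foldA, escTable] using hfold
          _ = escR2 ++ escScan rest := by rw [ih rest hlen]
      · obtain ⟨rest, hres⟩ := h3
        have ht : t = escK3.tail ++ rest := by
          have h' := hres
          rw [show escK3 = '&' :: escK3.tail from by decide, List.cons_append] at h'
          injection h' with _ h''
          exact h''.symm
        have hdrop : t.drop 4 = rest := by rw [ht]; exact List.drop_left' (by decide)
        have hlen : rest.length ≤ n := by
          have hlc := congrArg List.length hres
          have hkl : escK3.length = 5 := by decide
          simp [List.length_append] at hlc hs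
          omega
        rw [hdrop, ← hres]
        have hfold := fold_key_gen [(escK1, escR1), (escK2, escR2)] [(escK4, escR4), (escK5, escR5), (escK6, escR6), (escK7, escR7), (escK8, escR8)]
          escK3 escR3 (by decide) (by decide) (by decide) (by decide) (by decide) rest
        calc foldA (escK3 ++ rest) = escR3 ++ foldA rest := by
              simpa [foldA, escTable] using hfold
          _ = escR3 ++ escScan rest := by rw [ih rest hlen]
      · obtain ⟨rest, hres⟩ := h4
        have ht : t = escK4.tail ++ rest := by
          have h' := hres
          rw [show escK4 = '&' :: escK4.tail from by decide, List.cons_append] at h'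
          injection h' with _ h''
          exact h''.symm
        have hdrop : t.drop 4 = rest := by rw [ht]; exact List.drop_left' (by decide)
        have hlen : rest.length ≤ n := by
          have hlc := congrArg List.length hres
          have hkl : escK4.length = 5 := by decide
          simp [List.length_append] at hlc hs
          omega
        rw [hdrop, ← hres]
        have hfold := fold_key_gen [(escK1, escR1), (escK2, escR2), (escK3, escR3)] [(escK5, escR5), (escK6, escR6), (escK7, escR7), (escK8, escR8)]
          escK4 escR4 (by decide) (by decide) (by decide) (by decide) (by decide) rest
        calc foldA (escK4 ++ rest) = escR4 ++ foldA rest := by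
              simpa [foldA, escTable] using hfold
          _ = escR4 ++ escScan rest := by rw [ih rest hlen]
      · obtain ⟨rest, hres⟩ := h5
        have ht : t = escK5.tail ++ rest := by
          have h' := hres
          rw [show escK5 = '&' :: escK5.tail from by decide, List.cons_append] at h'
          injection h' with _ h''
          exact h''.symm
        have hdrop : t.drop 6 = rest := by rw [ht]; exact List.drop_left' (by decide)
        have hlen : rest.length ≤ n := by
          have hlc := congrArg List.length hres
          have hkl : escK5.length = 7 := by decide
          simp [List.length_append] at hlc hs
          omega
        rw [hdrop, ← hres]
        have hfold := fold_key_gen [(escK1, escR1), (escK2, escR2), (escK3, escR3), (escK4, escR4)] [(escK6, escR6), (escK7, escR7), (escK8, escR8)]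
          escK5 escR5 (by decide) (by decide) (by decide) (by decide) (by decide) rest
        calc foldA (escK5 ++ rest) = escR5 ++ foldA rest := by
              simpa [foldA, escTable] using hfold
          _ = escR5 ++ escScan rest := by rw [ih rest hlen]
      · obtain ⟨rest, hres⟩ := h6
        have ht : t = escK6.tail ++ rest := by
          have h' := hres
          rw [show escK6 = '&' :: escK6.tail from by decide, List.cons_append] at h'
          injection h' with _ h''
          exact h''.symm
        have hdrop : t.drop 5 = rest := by rw [ht]; exact List.drop_left' (by decide)
        have hlen : rest.length ≤ n := by
          have hlc := congrArg List.length hres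
          have hkl : escK6.length = 6 := by decide
          simp [List.length_append] at hlc hs
          omega
        rw [hdrop, ← hres]
        have hfold := fold_key_gen [(escK1, escR1), (escK2, escR2), (escK3, escR3), (escK4, escR4), (escK5, escR5)] [(escK7, escR7), (escK8, escR8)]
          escK6 escR6 (by decide) (by decide) (by decide) (by decide) (by decide) rest
        calc foldA (escK6 ++ rest) = escR6 ++ foldA rest := by
              simpa [foldA, escTable] using hfold
          _ = escR6 ++ escScan rest := by rw [ih rest hlen]
      · obtain ⟨rest, hres⟩ := h7
        have ht : t = escK7.tail ++ rest := by
          have h' := hres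
          rw [show escK7 = '&' :: escK7.tail from by decide, List.cons_append] at h'
          injection h' with _ h''
          exact h''.symm
        have hdrop : t.drop 6 = rest := by rw [ht]; exact List.drop_left' (by decide)
        have hlen : rest.length ≤ n := by
          have hlc := congrArg List.length hres
          have hkl : escK7.length = 7 := by decide
          simp [List.length_append] at hlc hs
          omega
        rw [hdrop, ← hres]
        have hfold := fold_key_gen [(escK1, escR1), (escK2, escR2), (escK3, escR3), (escK4, escR4), (escK5, escR5), (escK6, escR6)] [(escK8, escR8)]
          escK7 escR7 (by decide) (by decide) (by decide) (by decide) (by decide) rest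
        calc foldA (escK7 ++ rest) = escR7 ++ foldA rest := by
              simpa [foldA, escTable] using hfold
          _ = escR7 ++ escScan rest := by rw [ih rest hlen]
      · obtain ⟨rest, hres⟩ := h8
        have ht : t = escK8.tail ++ rest := by
          have h' := hres
          rw [show escK8 = '&' :: escK8.tail from by decide, List.cons_append] at h'
          injection h' with _ h''
          exact h''.symm
        have hdrop : t.drop 6 = rest := by rw [ht]; exact List.drop_left' (by decide)
        have hlen : rest.length ≤ n := by
          have hlc := congrArg List.length hres
          have hkl : escK8.length = 7 := by decide
          simp [List.length_append] at hlc hs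
          omega
        rw [hdrop, ← hres]
        have hfold := fold_key_gen [(escK1, escR1), (escK2, escR2), (escK3, escR3), (escK4, escR4), (escK5, escR5), (escK6, escR6), (escK7, escR7)] []
          escK8 escR8 (by decide) (by decide) (by decide) (by decide) (by decide) rest
        calc foldA (escK8 ++ rest) = escR8 ++ foldA rest := by
              simpa [foldA, escTable] using hfold
          _ = escR8 ++ escScan rest := by rw [ih rest hlen]
      · have hneg : ∀ p ∈ escTable, ¬ p.1 <+: (c :: t) := by
          intro p hp
          simp [escTable] at hp
          rcases hp with h|h|h|h|h|h|h|h <;> subst h <;> assumption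
        have hfold := fold_none_gen escTable (by decide) (by decide) c t hneg
        have hlt : t.length ≤ n := by simp at hs; omega
        calc foldA (c :: t) = c :: foldA t := by simpa [foldA, escTable] using hfold
          _ = c :: escScan t := by rw [ih t hlt]

-- ===== VERDICT (by name: the statement is the Claim_ definition above) =====
theorem correct_escape_char_spec : Claim_equal_correct_escape_char := by
  intro text _
  unfold Spec_correct_escape_char correct_escape_char_alt
  apply String.toList_inj.mp
  rw [A_chars, String.toList_ofList]
  exact foldA_eq_scan text.toList.length text.toList le_rfl
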